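-- pv_equiv track=rewrite | github.com/aarthur0/python_homework1 | strip.py | stripspaces
-- ===== SOURCE A (Python) =====
-- def stripspaces(s):
-- 	lst=s.split()
-- 	for i in range(0,len(lst)):
-- 		while lst[i]==" ":
-- 			del(lst[i])
-- 	for i in range(len(lst)-1,-1,-1):
-- 		while lst[i]==" ":
-- 			del(lst[i])
-- 	k=' '.join(lst)
-- 	return k
-- ===== SOURCE B (Python) =====
-- def stripspaces(s):
--     out = []
--     pending = False
--     emitted = False
--     for c in s:
--         if c.isspace():
--             pending = True
--         else:
--             if pending and emitted:
--                 out.append(' ')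
--             out.append(c)
--             emitted = True
--             pending = False
--     return ''.join(out)
-- ===== Notes on version B (the rewrite author's own statement) =====
-- stated objective: simpler
-- what changed: A splits into a word list (plus two dead loops deleting single-space entries that split() can never produce) and joins; B is a single character scan with a pending-separator flag that emits one space between words and never builds a word list.
import Mathlib
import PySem

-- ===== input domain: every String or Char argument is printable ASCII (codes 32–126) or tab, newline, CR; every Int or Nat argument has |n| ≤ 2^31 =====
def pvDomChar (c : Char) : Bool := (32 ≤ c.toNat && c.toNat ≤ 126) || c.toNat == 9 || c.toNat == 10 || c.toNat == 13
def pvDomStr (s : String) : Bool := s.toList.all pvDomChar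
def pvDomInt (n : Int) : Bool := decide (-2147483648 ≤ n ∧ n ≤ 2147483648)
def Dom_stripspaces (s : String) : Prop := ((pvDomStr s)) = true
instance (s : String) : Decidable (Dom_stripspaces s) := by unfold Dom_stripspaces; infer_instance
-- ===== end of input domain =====

-- B replaces A's split-then-join (with two dead deletion loops) by a single character scan
-- with a pending-separator flag; same cost, plainer structure.

-- ===== PORT A =====
-- 'while lst[i]==" ": del(lst[i])' — lst[i] via pyGet? (none = IndexError, loop stops with the
-- list unchanged, matching Python only where Python does not raise; the condition is in fact
-- never true on split() output, which the proof shows), del via pop?.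
def delWhile (l : List String) (i : Int) : List String :=
  match PySem.List.pyGet? l i with
  | none => l
  | some x =>
    if x = " " then
      match hp : PySem.List.pop? l i with
      | none => l
      | some r => delWhile r.2 i
    else l
termination_by l.length
decreasing_by
  have := PySem.List.length_of_pop?_eq_some l hp
  omega

def stripspaces (s : String) : String :=
  let lst := PySem.Str.split₀ s
  let lst := (PySem.List.pyRange 0 (lst.length : Int) 1).foldl (fun l i => delWhile l i) lst
  let lst := (PySem.List.pyRange ((lst.length : Int) - 1) (-1) (-1)).foldl (fun l i => delWhile l i) lst
  PySem.Str.join " " lst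

-- ===== PORT B =====
-- state: (out, pending, emitted)
def bStep (st : List Char × Bool × Bool) (c : Char) : List Char × Bool × Bool :=
  if PySem.Chars.isspace c then (st.1, true, st.2.2)
  else if st.2.1 && st.2.2 then (st.1 ++ [' ', c], false, true)
  else (st.1 ++ [c], false, true)

def stripspaces_alt (s : String) : String :=
  String.ofList (s.toList.foldl bStep (([] : List Char), false, false)).1

-- ===== PRECONDITION & SPEC =====
def Spec_stripspaces (s : String) (out : String) : Prop := out = stripspaces_alt s
instance (s : String) (out : String) : Decidable (Spec_stripspaces s out) := by unfold Spec_stripspaces; infer_instance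

-- ===== CLAIM (what is proved, stated in full; the proofs are below) =====
def Claim_equal_stripspaces : Prop := ∀ (s : String), Dom_stripspaces s → Spec_stripspaces s (stripspaces s)

-- ===== LEMMAS AND PROOFS =====

-- A-side: split() never produces the string " ", so the deletion loops are the identity.
lemma go_no_space : ∀ (cs cur : List Char) (acc : List (List Char)),
    (∀ w ∈ acc, ' ' ∉ w) → ' ' ∉ cur →
    ∀ w ∈ PySem.Chars.split₀.go cs cur acc, ' ' ∉ w := by
  intro cs
  induction cs with
  | nil =>
    intro cur acc hacc hcur w hw
    simp only [PySem.Chars.split₀.go] at hw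
    split at hw
    · exact hacc w (List.mem_reverse.mp hw)
    · rcases List.mem_cons.mp (List.mem_reverse.mp hw) with rfl | h
      · simpa using hcur
      · exact hacc w h
  | cons c rest ih =>
    intro cur acc hacc hcur w hw
    simp only [PySem.Chars.split₀.go] at hw
    by_cases hs : PySem.Chars.isspace c = true
    · rw [if_pos hs] at hw
      split at hw
      · exact ih [] acc hacc (by simp) w hw
      · refine ih [] (cur.reverse :: acc) ?_ (by simp) w hw
        intro v hv
        rcases List.mem_cons.mp hv with rfl | h
        · simpa using hcur
        · exact hacc v h
    · rw [if_neg hs] at hw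
      refine ih (c :: cur) acc hacc ?_ w hw
      intro h
      rcases List.mem_cons.mp h with rfl | h
      · simp [PySem.Chars.isspace] at hs
      · exact hcur h

lemma split₀_ne_space (s : String) : ∀ x ∈ PySem.Str.split₀ s, x ≠ " " := by
  intro x hx
  have hx' : x ∈ (PySem.Chars.split₀ s.toList).map String.ofList := hx
  rcases List.mem_map.mp hx' with ⟨w, hw, rfl⟩
  have hns : ' ' ∉ w :=
    go_no_space s.toList [] [] (by simp) (by simp) w hw
  intro heq
  have : w = [' '] := by
    have := congrArg String.toList heq
    simpa using this
  subst this
  simp at hns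

lemma delWhile_id (l : List String) (i : Int) (h : ∀ x ∈ l, x ≠ " ") :
    delWhile l i = l := by
  unfold delWhile
  split
  · rfl
  · rename_i x hx
    rw [if_neg (h x (PySem.List.mem_of_pyGet?_eq_some l hx))]

lemma foldl_delWhile_id (r : List Int) (l : List String) (h : ∀ x ∈ l, x ≠ " ") :
    r.foldl (fun l i => delWhile l i) l = l := by
  induction r with
  | nil => rfl
  | cons i r ih => simpa [delWhile_id l i h] using ih

lemma stripspaces_eq_join (s : String) :
    stripspaces s = PySem.Str.join " " (PySem.Str.split₀ s) := by
  unfold stripspaces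
  simp only [foldl_delWhile_id _ _ (split₀_ne_space s)]

-- B-side: the scan's accumulator only grows by appends, and the flags ignore it.
lemma bFold_shift (cs : List Char) (a : List Char) (p e : Bool) :
    cs.foldl bStep (a, p, e) =
      (a ++ (cs.foldl bStep ([], p, e)).1, (cs.foldl bStep ([], p, e)).2) := by
  induction cs generalizing a p e with
  | nil => simp
  | cons c rest ih =>
    simp only [List.foldl_cons]
    by_cases hs : PySem.Chars.isspace c = true
    · simp only [bStep, hs, if_pos]
      exact ih a true e
    · by_cases hpe : (p && e) = true
      · simp only [bStep, hs, hpe, Bool.false_eq_true, ite_false, if_true, List.nil_append]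
        rw [ih (a ++ [' ', c]) false true, ih [' ', c] false true]
        simp
      · simp only [bStep, hs, hpe, Bool.false_eq_true, ite_false, List.nil_append]
        rw [ih (a ++ [c]) false true, ih [c] false true]
        simp

-- ' '.join of a word list with one word appended at the end.
lemma join_snoc (ws : List (List Char)) (w : List Char) :
    PySem.Chars.join [' '] (ws ++ [w]) =
      PySem.Chars.join [' '] ws ++ (if ws = [] then [] else [' ']) ++ w := by
  induction ws with
  | nil => simp [PySem.Chars.join_singleton, PySem.Chars.join_nil]
  | cons a t ih =>
    cases t with
    | nil =>
      simp [PySem.Chars.join_cons_cons, PySem.Chars.join_singleton]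
    | cons b t' =>
      have h1 := PySem.Chars.join_cons_cons [' '] a b (t' ++ [w])
      rw [List.cons_append] at ih
      rw [show (a :: b :: t') ++ [w] = a :: (b :: (t' ++ [w])) by simp, h1, ih,
        PySem.Chars.join_cons_cons]
      simp

-- the characters already emitted by B at a given split₀.go state
def flatSt (cur : List Char) (accW : List (List Char)) : List Char :=
  PySem.Chars.join [' '] (if cur.isEmpty then accW.reverse else (cur.reverse :: accW).reverse)

-- the B-states that occur while split₀.go is at (cur, accW)
def OKst (cur : List Char) (accW : List (List Char)) (p e : Bool) : Prop :=
  (cur ≠ [] ∧ p = false ∧ e = true) ∨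
  (cur = [] ∧ e = decide (accW ≠ []) ∧ (accW ≠ [] → p = true))

lemma main_inv : ∀ (cs cur : List Char) (accW : List (List Char)) (p e : Bool),
    OKst cur accW p e →
    PySem.Chars.join [' '] (PySem.Chars.split₀.go cs cur accW) =
      flatSt cur accW ++ (cs.foldl bStep ([], p, e)).1 := by
  intro cs
  induction cs with
  | nil =>
    intro cur accW p e _
    simp [PySem.Chars.split₀.go, flatSt]
  | cons c rest ih =>
    intro cur accW p e hok
    simp only [PySem.Chars.split₀.go, List.foldl_cons]
    by_cases hs : PySem.Chars.isspace c = true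
    · -- whitespace: close the current word (if any); B only sets pending
      rw [if_pos hs]
      simp only [bStep, hs, if_pos]
      cases hcur : cur.isEmpty with
      | true =>
        have hc : cur = [] := by simpa using hcur
        subst hc
        rw [if_pos rfl]
        rcases hok with ⟨h, _⟩ | ⟨_, he, hp⟩
        · exact absurd rfl h
        · exact ih [] accW true e (Or.inr ⟨rfl, he, fun _ => rfl⟩)
      | false =>
        have hc : cur ≠ [] := by simpa using hcur
        rw [if_neg (by simpa using hc)]
        rcases hok with ⟨_, _, he⟩ | ⟨h, _⟩
        · subst he
          have := ih [] (cur.reverse :: accW) true true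
            (Or.inr ⟨rfl, by simp, fun _ => rfl⟩)
          rw [this]
          congr 1
          simp [flatSt, hcur]
        · exact absurd h hc
    · -- word character: B emits a separator iff pending ∧ emitted, then the character
      rw [if_neg hs]
      simp only [bStep, hs, Bool.false_eq_true, ite_false]
      rw [ih (c :: cur) accW false true (Or.inl ⟨by simp, rfl, rfl⟩)]
      have hshift : ∀ w0 : List Char,
          (rest.foldl bStep (w0, false, true)).1 =
            w0 ++ (rest.foldl bStep ([], false, true)).1 := by
        intro w0; rw [bFold_shift]
      have hflat : flatSt (c :: cur) accW =
          flatSt cur accW ++ (if (p && e) = true then [' ', c] else [c]) := by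
        rcases hok with ⟨hc, hp, _⟩ | ⟨hc, he, hp⟩
        · -- mid-word: p = false, append just the character
          subst hp
          simp only [Bool.false_and, Bool.false_eq_true, ite_false]
          have h1 : ((c :: cur).reverse :: accW).reverse =
              accW.reverse ++ [cur.reverse ++ [c]] := by simp
          have h2 : (cur.reverse :: accW).reverse = accW.reverse ++ [cur.reverse] := by simp
          simp only [flatSt]
          rw [if_neg (show ¬((c :: cur).isEmpty = true) by simp),
            if_neg (show ¬(cur.isEmpty = true) by simp [hc]), h1, h2, join_snoc, join_snoc]
          simp
        · subst hc
          by_cases ha : accW = []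
          · subst ha
            have he' : e = false := by simpa using he
            subst he'
            simp [flatSt, PySem.Chars.join_singleton, PySem.Chars.join_nil]
          · have hp' := hp ha
            subst hp'
            have he' : e = true := by simp [he, ha]
            subst he'
            simp only [Bool.and_self, ite_true]
            have h1 : ((c :: ([] : List Char)).reverse :: accW).reverse =
                accW.reverse ++ [[c]] := by simp
            simp only [flatSt]
            rw [if_neg (show ¬((c :: ([] : List Char)).isEmpty = true) by simp),
              if_pos (show (([] : List Char)).isEmpty = true from rfl), h1, join_snoc]
            simp [ha]
      simp only [List.nil_append]
      split
      · rename_i hpe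
        rw [hshift [' ', c], hflat, if_pos hpe]
        simp
      · rename_i hpe
        rw [hshift [c], hflat, if_neg hpe]
        simp

lemma alt_eq_join (s : String) :
    stripspaces_alt s = String.ofList (PySem.Chars.join [' '] (PySem.Chars.split₀ s.toList)) := by
  unfold stripspaces_alt
  congr 1
  have := main_inv s.toList [] [] false false (Or.inr ⟨rfl, by simp, by simp⟩)
  rw [show PySem.Chars.split₀ s.toList = PySem.Chars.split₀.go s.toList [] [] from rfl, this]
  simp [flatSt, PySem.Chars.join_nil]

lemma strJoin_eq (s : String) :
    PySem.Str.join " " (PySem.Str.split₀ s) =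
      String.ofList (PySem.Chars.join [' '] (PySem.Chars.split₀ s.toList)) := by
  unfold PySem.Str.join PySem.Str.split₀
  congr 1
  rw [List.map_map, show (String.toList ∘ String.ofList) = id from funext (fun w => by simp),
    List.map_id, show (" " : String).toList = [' '] from by decide]

-- ===== VERDICT (by name: the statement is the Claim_ definition above) =====
theorem stripspaces_spec : Claim_equal_stripspaces := by
  intro s _
  unfold Spec_stripspaces
  rw [stripspaces_eq_join, strJoin_eq, alt_eq_join]
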